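-- pv_equiv track=rewrite | github.com/Aasthaengg/IBMdataset | Python_codes/p03762/s535862943.py | f
-- ===== SOURCE A (Python) =====
-- mod=10**9+7
--
-- def f(a):
--     c=0
--     for i in range(len(a)):
--         c+=a[i]-a[0]
--     d=c
--     for i in range(1,len(a)-1):
--         d+=c-(len(a)-i)*(a[i]-a[i-1])
--         c-=(len(a)-i)*(a[i]-a[i-1])
--     return d%mod
-- ===== SOURCE B (Python) =====
-- mod=10**9+7
--
-- def f(a):
--     n=len(a)
--     s=0
--     for i,x in enumerate(a):
--         s+=x*(2*i-n+1)
--     return s%mod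
-- ===== Notes on version B (the rewrite author's own statement) =====
-- stated objective: simpler
-- what changed: Replaces A's two loops maintaining incremental running sums c and d by a single pass summing the closed-form contribution a[i]*(2*i-n+1) of each element.
import Mathlib
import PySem

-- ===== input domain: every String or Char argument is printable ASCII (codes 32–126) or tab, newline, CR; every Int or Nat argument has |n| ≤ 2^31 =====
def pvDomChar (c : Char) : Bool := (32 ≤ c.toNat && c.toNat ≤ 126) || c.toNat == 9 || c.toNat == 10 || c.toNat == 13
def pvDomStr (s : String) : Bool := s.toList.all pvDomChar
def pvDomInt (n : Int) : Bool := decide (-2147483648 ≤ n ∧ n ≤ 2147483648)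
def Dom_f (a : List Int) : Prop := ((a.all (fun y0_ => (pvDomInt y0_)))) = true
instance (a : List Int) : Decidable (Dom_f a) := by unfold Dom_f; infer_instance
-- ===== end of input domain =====

-- B replaces A's two incremental running-sum loops (c and d) by one pass summing each
-- element's closed-form weighted contribution a[i]*(2*i-n+1); same O(n) cost, simpler.


-- ===== PORT A =====
-- indices produced by the ranges are always in [0, len a), so pyGetD's default is never used
def f (a : List Int) : Int :=
  let n : Int := a.length
  let c : Int := (PySem.List.pyRange 0 n 1).foldl
    (fun c i => c + (PySem.List.pyGetD a i 0 - PySem.List.pyGetD a 0 0)) 0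
  let cd : Int × Int := (PySem.List.pyRange 1 (n - 1) 1).foldl
    (fun s i =>
      (s.1 - (n - i) * (PySem.List.pyGetD a i 0 - PySem.List.pyGetD a (i - 1) 0),
       s.2 + (s.1 - (n - i) * (PySem.List.pyGetD a i 0 - PySem.List.pyGetD a (i - 1) 0))))
    (c, c)
  PySem.Int.mod cd.2 1000000007

-- ===== PORT B =====
def f_alt (a : List Int) : Int :=
  let n : Int := a.length
  let s : Int := (PySem.List.enumerate a 0).foldl
    (fun s p => s + p.2 * (2 * p.1 - n + 1)) 0
  PySem.Int.mod s 1000000007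

-- ===== PRECONDITION & SPEC =====
def Spec_f (a : List Int) (out : Int) : Prop := out = f_alt a
instance (a : List Int) (out : Int) : Decidable (Spec_f a out) := by unfold Spec_f; infer_instance

-- ===== CLAIM (what is proved, stated in full; the proofs are below) =====
def Claim_equal_f : Prop := ∀ (a : List Int), Dom_f a → Spec_f a (f a)

-- ===== LEMMAS AND PROOFS =====

-- g a k = a[k] (in-range), S a t = a[0]+…+a[t-1]
def pvG (a : List Int) (k : Nat) : Int := a.getD k 0
def pvS (a : List Int) (t : Nat) : Int := ∑ i ∈ Finset.range t, pvG a i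

-- the per-step decrement of A's second loop at i = k ≥ 1
def pvX (a : List Int) (k : Nat) : Int :=
  ((a.length : Int) - k) * (pvG a k - pvG a (k - 1))

-- A's c after m iterations of the second loop, and A's d
def pvC (a : List Int) : Nat → Int
  | 0 => pvS a a.length - (a.length : Int) * pvG a 0
  | m + 1 => pvC a m - pvX a (m + 1)

def pvD (a : List Int) : Nat → Int
  | 0 => pvC a 0
  | m + 1 => pvD a m + pvC a (m + 1)

theorem pvC_closed (a : List Int) (m : Nat) (hm : m + 1 ≤ a.length) :
    pvC a m = (pvS a a.length - pvS a m) - ((a.length : Int) - m) * pvG a m := by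
  induction m with
  | zero => simp [pvC, pvS]
  | succ m ih =>
    have h' : m + 1 ≤ a.length := by omega
    have hs : pvS a (m + 1) = pvS a m + pvG a m := Finset.sum_range_succ _ _
    rw [pvC, ih h', pvX]
    simp only [Nat.add_sub_cancel]
    push_cast
    rw [hs]
    ring

theorem pvD_closed (a : List Int) (m : Nat) (hm : m + 1 ≤ a.length) :
    pvD a m = ∑ i ∈ Finset.range (m + 1),
      ((pvS a a.length - pvS a i) - ((a.length : Int) - i) * pvG a i) := by
  induction m with
  | zero => simp [pvD, pvC_closed a 0 (by omega)]
  | succ m ih =>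
    rw [pvD, ih (by omega), pvC_closed a (m + 1) hm]
    conv_rhs => rw [Finset.sum_range_succ]

-- B's sum over range n with weight 2k-n+1
def pvQ (a : List Int) (t : Nat) : Int :=
  ∑ k ∈ Finset.range t, pvG a k * (2 * k - (a.length : Int) + 1)

-- general form of the key identity, over an arbitrary coefficient function g
theorem pv_key' (g : Nat → Int) (t : Nat) :
    (∑ i ∈ Finset.range t,
        ((∑ j ∈ Finset.range (t + 1), g j) - (∑ j ∈ Finset.range i, g j)
          - (((t : Int) + 1) - i) * g i))
    = ∑ k ∈ Finset.range (t + 1), g k * (2 * k - ((t : Int) + 1) + 1) := by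
  induction t with
  | zero => simp
  | succ t ih =>
    have hL : ∀ i ∈ Finset.range t,
        ((∑ j ∈ Finset.range (t + 1 + 1), g j) - (∑ j ∈ Finset.range i, g j)
          - ((((t : Nat) + 1 : Nat) : Int) + 1 - i) * g i)
        = ((∑ j ∈ Finset.range (t + 1), g j) - (∑ j ∈ Finset.range i, g j)
          - (((t : Int) + 1) - i) * g i) + (g (t + 1) - g i) := by
      intro i hi
      rw [Finset.sum_range_succ]
      push_cast
      ring
    have hR : ∀ k ∈ Finset.range (t + 1),
        g k * (2 * k - ((((t : Nat) + 1 : Nat) : Int) + 1) + 1)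
        = g k * (2 * k - ((t : Int) + 1) + 1) - g k := by
      intro k hk; push_cast; ring
    rw [Finset.sum_range_succ, Finset.sum_congr rfl hL, Finset.sum_add_distrib, ih,
      Finset.sum_sub_distrib, Finset.sum_const, Finset.card_range]
    conv_rhs => rw [Finset.sum_range_succ]
    have e2 : ∑ j ∈ Finset.range (t + 1 + 1), g j
        = (∑ j ∈ Finset.range t, g j) + g t + g (t + 1) := by
      rw [Finset.sum_range_succ, Finset.sum_range_succ]
    have e1 : ∑ j ∈ Finset.range (t + 1), g j
        = (∑ j ∈ Finset.range t, g j) + g t := Finset.sum_range_succ _ _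
    rw [e2]
    conv_rhs => rw [Finset.sum_congr rfl hR, Finset.sum_sub_distrib, e1]
    push_cast
    ring

-- the key identity: A's d (closed form) = B's weighted sum, for n = t+1 ≥ 1
theorem pv_key (a : List Int) (t : Nat) (ht : t + 1 = a.length) :
    (∑ i ∈ Finset.range t,
        ((pvS a a.length - pvS a i) - ((a.length : Int) - i) * pvG a i)) =
      pvQ a a.length := by
  unfold pvS pvQ
  rw [← ht]
  push_cast
  exact pv_key' (pvG a) t

-- list sum as an indexed range sum
theorem pv_sum_eq (a : List Int) : a.sum = pvS a a.length := by
  induction a with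
  | nil => simp [pvS]
  | cons x xs ih =>
    rw [List.sum_cons, ih]
    unfold pvS
    rw [List.length_cons, Finset.sum_range_succ']
    simp [pvG]
    ring

theorem pv_map_sub_sum (a : List Int) (v : Int) :
    (a.map (fun x => x - v)).sum = a.sum - (a.length : Int) * v := by
  induction a with
  | nil => simp
  | cons x xs ih =>
    simp [ih]
    ring

-- first loop of A computes pvC a 0
theorem pv_first_loop (a : List Int) :
    (PySem.List.pyRange 0 (a.length : Int) 1).foldl
      (fun c i => c + (PySem.List.pyGetD a i 0 - PySem.List.pyGetD a 0 0)) 0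
      = pvC a 0 := by
  rw [PySem.List.foldl_pyRange_zero_pyGetD' a 0
      (fun acc x => acc + (x - PySem.List.pyGetD a 0 0)) 0,
    PySem.List.foldl_add, pv_map_sub_sum, pv_sum_eq]
  simp [pvC, pvG, PySem.List.pyGetD_zero]

-- second loop of A computes (pvC a m, pvD a m) after m iterations
theorem pv_second_loop (a : List Int) (m : Nat) (hm : m + 1 ≤ a.length) :
    (PySem.List.pyRange 1 (1 + (m : Int)) 1).foldl
      (fun s i =>
        (s.1 - ((a.length : Int) - i) * (PySem.List.pyGetD a i 0 - PySem.List.pyGetD a (i - 1) 0),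
         s.2 + (s.1 - ((a.length : Int) - i) * (PySem.List.pyGetD a i 0 - PySem.List.pyGetD a (i - 1) 0))))
      (pvC a 0, pvC a 0)
      = (pvC a m, pvD a m) := by
  induction m with
  | zero =>
    rw [PySem.List.pyRange_one_eq_nil (by norm_num)]
    simp [pvD]
  | succ m ih =>
    have hstep : (1 : Int) + ((m : Nat) + 1 : Nat) = (1 + (m : Int)) + 1 := by push_cast; ring
    rw [hstep, PySem.List.pyRange_one_succ_right (by omega), List.foldl_append,
      ih (by omega)]
    have hi : (1 : Int) + (m : Int) = (((m + 1 : Nat)) : Int) := by omega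
    simp only [List.foldl_cons, List.foldl_nil, hi, PySem.List.pyGetD_natCast]
    show (_, _) = (pvC a (m + 1), pvD a (m + 1))
    rw [pvC, pvD, pvC, pvX]
    simp [pvG]

-- B's fold with a generalized start index and accumulator
theorem pv_enum_fold (n : Int) (l : List Int) (s0 : Int) (init : Int) :
    (PySem.List.enumerate l s0).foldl (fun acc p => acc + p.2 * (2 * p.1 - n + 1)) init
    = init + ∑ k ∈ Finset.range l.length, l.getD k 0 * (2 * (s0 + k) - n + 1) := by
  induction l generalizing s0 init with
  | nil => simp [PySem.List.enumerate_nil]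
  | cons x xs ih =>
    rw [PySem.List.enumerate_cons, List.foldl_cons, ih]
    rw [List.length_cons, Finset.sum_range_succ']
    simp only [List.getD_cons_succ, List.getD_cons_zero]
    have : ∀ k ∈ Finset.range xs.length,
        xs.getD k 0 * (2 * (s0 + 1 + k) - n + 1)
        = xs.getD k 0 * (2 * (s0 + ((k + 1 : Nat) : Int)) - n + 1) := by
      intro k hk; push_cast; ring
    rw [Finset.sum_congr rfl this]
    push_cast
    ring

-- B's fold computes pvQ
theorem pv_b_fold (a : List Int) :
    (PySem.List.enumerate a 0).foldl
      (fun s p => s + p.2 * (2 * p.1 - (a.length : Int) + 1)) 0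
      = pvQ a a.length := by
  rw [pv_enum_fold]
  unfold pvQ pvG
  simp

-- ===== VERDICT (by name: the statement is the Claim_ definition above) =====
theorem f_spec : Claim_equal_f := by
  intro a _
  unfold Spec_f f f_alt
  simp only []
  rw [pv_first_loop, pv_b_fold]
  rcases Nat.lt_or_ge a.length 2 with h2 | h2
  · interval_cases h : a.length
    · rw [List.length_eq_zero_iff] at h
      subst h
      decide
    · obtain ⟨x, hx⟩ : ∃ x, a = [x] := by
        cases a with
        | nil => simp at h
        | cons y t => exact ⟨y, by simpa using List.length_eq_zero_iff.mp (by simpa using h)⟩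
      subst hx
      simp [pvC, pvS, pvG, pvQ, PySem.List.pyRange_one_eq_nil]
  · obtain ⟨m, hm⟩ : ∃ m, a.length = m + 2 := ⟨a.length - 2, by omega⟩
    have hb : ((a.length : Int) - 1) = 1 + ((m : Nat) : Int) := by
      rw [hm]; push_cast; ring
    rw [hb, pv_second_loop a m (by omega), pvD_closed a m (by omega),
      pv_key a (m + 1) (by omega)]
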